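-- pv_equiv track=rewrite | github.com/BamlakT/Algo-courses-in-Epita-S1-2021 | s1-python-main/loops/S1_td2_loops_1.py | sumSums
-- ===== SOURCE A (Python) =====
-- def u(i):
--     return 3*i + 2
--
-- def sumSums(n):
--     '''
--     returns the sum of S_i with i from 0 to n
--     '''
--     sumS = 0
--     i = 1
--     while i <= n:
--         s = 0
--         j = 1
--         while j <= i:
--             s = s + u(j)
--             j = j + 1
--         sumS = sumS + s
--         i = i + 1
--     return sumS
-- ===== SOURCE B (Python) =====
-- def sumSums(n):
--     '''
--     returns the sum of S_i with i from 0 to n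
--     '''
--     if n < 0:
--         return 0
--     return n * (n + 1) * (n + 4) // 2
-- ===== Notes on version B (the rewrite author's own statement) =====
-- stated objective: faster
-- what changed: Replaced the nested while loops (sum of partial sums of 3j+2) by the closed-form polynomial n*(n+1)*(n+4)//2.
import Mathlib
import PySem

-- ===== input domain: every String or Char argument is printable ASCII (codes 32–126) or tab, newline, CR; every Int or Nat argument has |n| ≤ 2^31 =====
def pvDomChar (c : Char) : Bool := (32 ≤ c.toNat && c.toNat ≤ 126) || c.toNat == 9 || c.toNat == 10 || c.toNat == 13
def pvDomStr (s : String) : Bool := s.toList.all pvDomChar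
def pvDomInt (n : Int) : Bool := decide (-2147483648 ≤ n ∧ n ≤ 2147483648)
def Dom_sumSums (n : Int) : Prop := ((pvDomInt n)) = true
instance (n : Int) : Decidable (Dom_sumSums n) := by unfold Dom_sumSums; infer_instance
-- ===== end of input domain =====

-- B replaces A's O(n^2) nested while loops by the closed form n*(n+1)*(n+4)//2 (O(1)).

-- ===== PORT A =====
-- 'u(j) = 3*j + 2' is inlined as the same expression.
-- inner while loop 'while j <= i': runs (i - j + 1) times; fuel is that count.
def sumSumsInner : Nat → Int → Int → Int
  | 0, _, s => s
  | k + 1, j, s => sumSumsInner k (j + 1) (s + (3 * j + 2))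

-- outer while loop 'while i <= n', accumulating sumS.
def sumSumsOuter : Nat → Int → Int → Int
  | 0, _, acc => acc
  | k + 1, i, acc => sumSumsOuter k (i + 1) (acc + sumSumsInner i.toNat 1 0)

def sumSums (n : Int) : Int := sumSumsOuter n.toNat 1 0

-- ===== PORT B =====
def sumSums_alt (n : Int) : Int :=
  if n < 0 then 0 else PySem.Int.floordiv (n * (n + 1) * (n + 4)) 2

-- ===== PRECONDITION & SPEC =====
def Spec_sumSums (n : Int) (out : Int) : Prop := out = sumSums_alt n
instance (n : Int) (out : Int) : Decidable (Spec_sumSums n out) := by unfold Spec_sumSums; infer_instance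

-- ===== CLAIM (what is proved, stated in full; the proofs are below) =====
def Claim_equal_sumSums : Prop := ∀ (n : Int), Dom_sumSums n → Spec_sumSums n (sumSums n)

-- ===== LEMMAS AND PROOFS =====

lemma inner_doubled (k : Nat) : ∀ (j s : Int),
    2 * sumSumsInner k j s = 2 * s + 3 * k * (2 * j + k - 1) + 4 * k := by
  induction k with
  | zero => intro j s; simp [sumSumsInner]
  | succ m ih =>
    intro j s
    rw [sumSumsInner, ih (j + 1) (s + (3 * j + 2))]
    push_cast
    ring

-- F m = m*(m+1)*(m+4); telescoping: 2*inner(i) = F i - F (i-1)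
lemma outer_doubled (k : Nat) : ∀ (i acc : Int), 1 ≤ i →
    2 * sumSumsOuter k i acc =
      2 * acc + (i + k - 1) * (i + k) * (i + k + 3) - (i - 1) * i * (i + 3) := by
  induction k with
  | zero => intro i acc _; simp [sumSumsOuter]
  | succ m ih =>
    intro i acc hi
    rw [sumSumsOuter, ih (i + 1) _ (by omega)]
    have h2 : 2 * sumSumsInner i.toNat 1 0 = i * (3 * i + 7) := by
      rw [inner_doubled i.toNat 1 0, Int.toNat_of_nonneg (by omega)]
      ring
    push_cast
    linear_combination h2

lemma floordiv_two_mul (x : Int) : PySem.Int.floordiv (2 * x) 2 = x := by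
  simp [PySem.Int.floordiv, Int.mul_fdiv_cancel_left x (by norm_num : (2:Int) ≠ 0)]

-- ===== VERDICT (by name: the statement is the Claim_ definition above) =====
theorem sumSums_spec : Claim_equal_sumSums := by
  intro n _
  unfold Spec_sumSums sumSums sumSums_alt
  by_cases hn : n < 0
  · have : n.toNat = 0 := by omega
    simp [this, sumSumsOuter, hn]
  · have hn0 : 0 ≤ n := by omega
    have h := outer_doubled n.toNat 1 0 (by norm_num)
    rw [Int.toNat_of_nonneg hn0] at h
    have hval : sumSumsOuter n.toNat 1 0 * 2 = n * (n + 1) * (n + 4) := by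
      linarith [h]
    simp only [if_neg hn]
    rw [← hval, mul_comm]
    exact (floordiv_two_mul _).symm
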